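-- pv_equiv track=rewrite | github.com/traneric/computational_genomics_2024 | scripts/detect_intersections.py | combine_programmed_frameshift_coordinates
-- ===== SOURCE A (Python) =====
-- def combine_programmed_frameshift_coordinates(coordinates_dict):
--     for contig_ID, tuples in coordinates_dict.items():
--         subject_dict = {}
--         for start, end, subject_id in tuples:
--             if subject_id not in subject_dict:
--                 subject_dict[subject_id] = [start, end]
--             else:
--                 subject_dict[subject_id][0] = min(subject_dict[subject_id][0], start)
--                 subject_dict[subject_id][1] = max(subject_dict[subject_id][1], end)
--         coordinates_dict[contig_ID] = [(coords[0], coords[1], subject_id) for subject_id, coords in subject_dict.items()]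
--     return coordinates_dict
-- ===== SOURCE B (Python) =====
-- def combine_programmed_frameshift_coordinates(coordinates_dict):
--     for contig_ID, tuples in coordinates_dict.items():
--         groups = {}
--         for start, end, subject_id in tuples:
--             groups.setdefault(subject_id, []).append((start, end))
--         coordinates_dict[contig_ID] = [
--             (min(s for s, _ in pairs), max(e for _, e in pairs), subject_id)
--             for subject_id, pairs in groups.items()
--         ]
--     return coordinates_dict
-- ===== Notes on version B (the rewrite author's own statement) =====
-- stated objective: alternative
-- what changed: B groups all (start, end) pairs per subject_id first (setdefault/append, first-seen order) and then reduces each group with min/max in a second pass, instead of A's single pass maintaining a running min/max aggregate with an if/else update.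
import Mathlib
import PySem

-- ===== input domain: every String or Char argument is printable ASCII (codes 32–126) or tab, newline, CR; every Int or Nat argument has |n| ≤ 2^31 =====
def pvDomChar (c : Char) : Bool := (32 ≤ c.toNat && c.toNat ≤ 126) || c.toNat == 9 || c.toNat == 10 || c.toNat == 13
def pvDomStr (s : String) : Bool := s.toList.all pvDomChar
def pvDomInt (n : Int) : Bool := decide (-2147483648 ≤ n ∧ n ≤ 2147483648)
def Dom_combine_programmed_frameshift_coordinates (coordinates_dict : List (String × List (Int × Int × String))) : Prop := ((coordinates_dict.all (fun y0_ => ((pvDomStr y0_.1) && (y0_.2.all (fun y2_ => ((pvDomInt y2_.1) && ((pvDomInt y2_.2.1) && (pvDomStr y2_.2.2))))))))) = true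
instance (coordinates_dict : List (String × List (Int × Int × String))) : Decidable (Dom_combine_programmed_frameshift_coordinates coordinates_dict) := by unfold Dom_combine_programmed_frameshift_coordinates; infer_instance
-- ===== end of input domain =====

-- B replaces A's running min/max aggregate by a collect-then-reduce pass (group pairs per
-- subject_id, then reduce each group with min/max); same cost, different decomposition.
-- A mutates its argument dict in place; the equivalence proved here is about the return value.

-- ===== PORT A =====
-- inner loop of A over one contig's tuples: running (min, max) per subject_id
def pvStepA (d : PySem.Dict String (Int × Int)) (t : Int × Int × String) :
    PySem.Dict String (Int × Int) :=
  match d.get? t.2.2 with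
  | none => d.insert t.2.2 (t.1, t.2.1)                       -- subject_dict[subject_id] = [start, end]
  | some (a, b) => d.insert t.2.2 (min a t.1, max b t.2.1)    -- in-place update of both cells (position preserved)

def pvInnerA (tuples : List (Int × Int × String)) : List (Int × Int × String) :=
  ((tuples.foldl pvStepA PySem.Dict.empty).items).map (fun p => (p.2.1, p.2.2, p.1))

def combine_programmed_frameshift_coordinates (coordinates_dict : List (String × List (Int × Int × String))) : List (String × List (Int × Int × String)) :=
  -- for contig_ID, tuples in coordinates_dict.items(): … coordinates_dict[contig_ID] = …
  -- (reassignment at an existing key keeps its position, so the loop maps each entry in place)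
  coordinates_dict.map (fun c => (c.1, pvInnerA c.2))

-- ===== PORT B =====
-- groups.setdefault(subject_id, []).append((start, end)) : rewrite the key's value in place
def pvStepB (g : PySem.Dict String (List (Int × Int))) (t : Int × Int × String) :
    PySem.Dict String (List (Int × Int)) :=
  g.insert t.2.2 (g.getD t.2.2 [] ++ [(t.1, t.2.1)])

-- min(s for s, _ in pairs) on a nonempty pairs list (groups' values are always nonempty)
def pvMinFst : List (Int × Int) → Int
  | [] => 0
  | p :: ps => ps.foldl (fun m q => min m q.1) p.1

-- max(e for _, e in pairs) on a nonempty pairs list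
def pvMaxSnd : List (Int × Int) → Int
  | [] => 0
  | p :: ps => ps.foldl (fun m q => max m q.2) p.2

def pvInnerB (tuples : List (Int × Int × String)) : List (Int × Int × String) :=
  ((tuples.foldl pvStepB PySem.Dict.empty).items).map (fun p => (pvMinFst p.2, pvMaxSnd p.2, p.1))

def combine_programmed_frameshift_coordinates_alt (coordinates_dict : List (String × List (Int × Int × String))) : List (String × List (Int × Int × String)) :=
  coordinates_dict.map (fun c => (c.1, pvInnerB c.2))

-- ===== PRECONDITION & SPEC =====
def Spec_combine_programmed_frameshift_coordinates (coordinates_dict : List (String × List (Int × Int × String))) (out : List (String × List (Int × Int × String))) : Prop := out = combine_programmed_frameshift_coordinates_alt coordinates_dict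
instance (coordinates_dict : List (String × List (Int × Int × String))) (out : List (String × List (Int × Int × String))) : Decidable (Spec_combine_programmed_frameshift_coordinates coordinates_dict out) := by unfold Spec_combine_programmed_frameshift_coordinates; infer_instance

-- ===== CLAIM (what is proved, stated in full; the proofs are below) =====
def Claim_equal_combine_programmed_frameshift_coordinates : Prop := ∀ (coordinates_dict : List (String × List (Int × Int × String))), Dom_combine_programmed_frameshift_coordinates coordinates_dict → Spec_combine_programmed_frameshift_coordinates coordinates_dict (combine_programmed_frameshift_coordinates coordinates_dict)

-- ===== LEMMAS AND PROOFS =====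

-- reduce a B-group entry (key, pairs) to A's aggregate entry (key, (min, max))
def pvRed (p : String × List (Int × Int)) : String × (Int × Int) :=
  (p.1, (pvMinFst p.2, pvMaxSnd p.2))

lemma pvMinFst_append (ps : List (Int × Int)) (q : Int × Int) (h : ps ≠ []) :
    pvMinFst (ps ++ [q]) = min (pvMinFst ps) q.1 := by
  cases ps with
  | nil => exact absurd rfl h
  | cons p ps => simp [pvMinFst, List.foldl_append]

lemma pvMaxSnd_append (ps : List (Int × Int)) (q : Int × Int) (h : ps ≠ []) :
    pvMaxSnd (ps ++ [q]) = max (pvMaxSnd ps) q.2 := by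
  cases ps with
  | nil => exact absurd rfl h
  | cons p ps => simp [pvMaxSnd, List.foldl_append]

lemma pv_nodup_keysB (l : List (Int × Int × String)) :
    (l.foldl pvStepB PySem.Dict.empty).keys.Nodup := by
  have := PySem.Dict.nodup_keys_foldl_insert_key l (fun t : Int × Int × String => t.2.2)
    (fun g t => g.getD t.2.2 [] ++ [(t.1, t.2.1)]) PySem.Dict.empty PySem.Dict.nodup_keys_empty
  exact this

-- the central invariant: A's dict items are B's group items reduced by pvRed,
-- and every group in B's dict is nonempty
lemma pv_inv (l : List (Int × Int × String)) :
    (l.foldl pvStepA PySem.Dict.empty).items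
        = ((l.foldl pvStepB PySem.Dict.empty).items).map pvRed
    ∧ ∀ p ∈ (l.foldl pvStepB PySem.Dict.empty).items, p.2 ≠ [] := by
  induction l using List.reverseRecOn with
  | nil => simp [PySem.Dict.empty]
  | append_singleton l t ih =>
    obtain ⟨hit, hne⟩ := ih
    set dA := l.foldl pvStepA PySem.Dict.empty with hdA
    set gB := l.foldl pvStepB PySem.Dict.empty with hgB
    have hnodB : gB.keys.Nodup := pv_nodup_keysB l
    have hkeys : dA.keys = gB.keys := by
      show dA.items.map (·.1) = gB.items.map (·.1)
      rw [hit, List.map_map]; rfl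
    have hA : (l ++ [t]).foldl pvStepA PySem.Dict.empty = pvStepA dA t := by
      rw [List.foldl_append]; rfl
    have hB : (l ++ [t]).foldl pvStepB PySem.Dict.empty = pvStepB gB t := by
      rw [List.foldl_append]; rfl
    rw [hA, hB]
    by_cases hc : gB.contains t.2.2 = true
    · -- key already present
      have hcA : dA.contains t.2.2 = true := by
        rw [PySem.Dict.contains_eq_decide_mem_keys] at hc ⊢
        rw [hkeys]; exact hc
      have hmemk : t.2.2 ∈ dA.keys := (PySem.Dict.contains_iff_mem_keys dA t.2.2).1 hcA
      have hsome : ∃ v, dA.get? t.2.2 = some v := by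
        rcases h : dA.get? t.2.2 with _ | v
        · exact absurd ((PySem.Dict.get?_eq_none_iff_not_mem_keys dA t.2.2).1 h) (by simp [hmemk])
        · exact ⟨v, rfl⟩
      obtain ⟨⟨a, b⟩, hv⟩ := hsome
      have hmemA : (t.2.2, (a, b)) ∈ dA.items :=
        PySem.Dict.mem_items_of_get?_eq_some dA hv
      have hmemB : ∃ ps, (t.2.2, ps) ∈ gB.items ∧ a = pvMinFst ps ∧ b = pvMaxSnd ps := by
        rw [hit] at hmemA
        obtain ⟨q, hq, hred⟩ := List.mem_map.1 hmemA
        obtain ⟨k, ps⟩ := q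
        have h1 : k = t.2.2 ∧ pvMinFst ps = a ∧ pvMaxSnd ps = b := by
          simpa [pvRed, Prod.ext_iff] using hred
        exact ⟨ps, h1.1 ▸ hq, h1.2.1.symm, h1.2.2.symm⟩
      obtain ⟨ps, hpsmem, hmin, hmax⟩ := hmemB
      have hps_ne : ps ≠ [] := hne _ hpsmem
      have hgetD : gB.getD t.2.2 [] = ps :=
        PySem.Dict.getD_of_mem_items gB hpsmem hnodB []
      have hitemsA : (pvStepA dA t).items
          = dA.items.map (fun p => if p.1 == t.2.2 then (t.2.2, (min a t.1, max b t.2.1)) else p) := by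
        simp only [pvStepA, hv]
        exact PySem.Dict.items_insert_of_contains _ _ hcA
      have hitemsB : (pvStepB gB t).items
          = gB.items.map (fun p => if p.1 == t.2.2 then (t.2.2, ps ++ [(t.1, t.2.1)]) else p) := by
        simp only [pvStepB, hgetD]
        exact PySem.Dict.items_insert_of_contains _ _ hc
      constructor
      · rw [hitemsA, hitemsB, hit, List.map_map, List.map_map]
        apply List.map_congr_left
        rintro ⟨k, qs⟩ hq
        by_cases hk : k = t.2.2
        · have hqs : qs = ps := by
            have h2 : gB.getD k [] = qs := PySem.Dict.getD_of_mem_items gB hq hnodB []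
            rw [hk, hgetD] at h2; exact h2.symm
          simp [Function.comp, pvRed, hk, hqs, pvMinFst_append ps _ hps_ne,
            pvMaxSnd_append ps _ hps_ne, hmin, hmax]
        · simp [Function.comp, pvRed, hk]
      · intro p hp
        rw [hitemsB] at hp
        obtain ⟨q, hq, heq⟩ := List.mem_map.1 hp
        by_cases hq1 : (q.1 == t.2.2) = true
        · simp [hq1] at heq; rw [← heq]; simp
        · simp [hq1] at heq; rw [← heq]; exact hne q hq
    · -- fresh key
      have hcA : dA.contains t.2.2 = false := by
        rw [PySem.Dict.contains_eq_decide_mem_keys] at hc ⊢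
        rw [hkeys]; simpa using hc
      have hnone : dA.get? t.2.2 = none := by
        apply (PySem.Dict.get?_eq_none_iff_not_mem_keys dA t.2.2).2
        intro hmem
        rw [PySem.Dict.contains_eq_decide_mem_keys] at hcA
        simp [hmem] at hcA
      have hcB : gB.contains t.2.2 = false := by simpa using hc
      have hgetD : gB.getD t.2.2 [] = [] := PySem.Dict.getD_of_not_contains gB [] hcB
      have hitemsA : (pvStepA dA t).items = dA.items ++ [(t.2.2, (t.1, t.2.1))] := by
        simp only [pvStepA, hnone]
        exact PySem.Dict.items_insert_of_not_contains _ _ hcA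
      have hitemsB : (pvStepB gB t).items = gB.items ++ [(t.2.2, [(t.1, t.2.1)])] := by
        simp only [pvStepB, hgetD, List.nil_append]
        exact PySem.Dict.items_insert_of_not_contains _ _ hcB
      constructor
      · rw [hitemsA, hitemsB, List.map_append, hit]
        simp [pvRed, pvMinFst, pvMaxSnd]
      · intro p hp
        rw [hitemsB] at hp
        rcases List.mem_append.1 hp with hp | hp
        · exact hne p hp
        · simp at hp; rw [hp]; simp

lemma pvInner_eq (tuples : List (Int × Int × String)) : pvInnerA tuples = pvInnerB tuples := by
  unfold pvInnerA pvInnerB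
  rw [(pv_inv tuples).1, List.map_map]
  apply List.map_congr_left
  intro q _
  simp [Function.comp, pvRed]

-- ===== VERDICT (by name: the statement is the Claim_ definition above) =====
theorem combine_programmed_frameshift_coordinates_spec : Claim_equal_combine_programmed_frameshift_coordinates := by
  intro coordinates_dict _
  unfold Spec_combine_programmed_frameshift_coordinates
  unfold combine_programmed_frameshift_coordinates combine_programmed_frameshift_coordinates_alt
  apply List.map_congr_left
  intro c _
  rw [pvInner_eq]
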